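-- pv_equiv track=rewrite | github.com/sungyeong98/study | practice/practice_level4_word_puzzle.py | solution
-- ===== SOURCE A (Python) =====
-- def solution(strs,t):
--     dp=[0 for i in range(len(t)+1)]
--     for i in range(1,len(t)+1):
--         dp[i]=float('inf')
--         for j in range(1,6):
--             if i-j<0:
--                 break
--             start=i-j
--             if t[start:i] in strs:
--                 dp[i]=min(dp[i],dp[i-j]+1)
--     if dp[-1]==float('inf'):
--         return -1
--     return dp[-1]
-- ===== SOURCE B (Python) =====
-- def solution(strs, t):
--     n = len(t)
--     frontier = [0]
--     visited = {0}
--     level = 0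
--     while frontier:
--         if n in frontier:
--             return level
--         nxt = []
--         for p in frontier:
--             for j in range(1, 6):
--                 q = p + j
--                 if q <= n and q not in visited and t[p:q] in strs:
--                     visited.add(q)
--                     nxt.append(q)
--         frontier = nxt
--         level += 1
--     return -1
-- ===== Notes on version B (the rewrite author's own statement) =====
-- stated objective: alternative
-- what changed: Replaces the backward dynamic-programming table over all prefix lengths with a level-synchronous breadth-first search over positions 0..len(t) (frontier list + visited set) that only visits positions reachable by dictionary words and stops as soon as the end is reached or the frontier empties.
import Mathlib
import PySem

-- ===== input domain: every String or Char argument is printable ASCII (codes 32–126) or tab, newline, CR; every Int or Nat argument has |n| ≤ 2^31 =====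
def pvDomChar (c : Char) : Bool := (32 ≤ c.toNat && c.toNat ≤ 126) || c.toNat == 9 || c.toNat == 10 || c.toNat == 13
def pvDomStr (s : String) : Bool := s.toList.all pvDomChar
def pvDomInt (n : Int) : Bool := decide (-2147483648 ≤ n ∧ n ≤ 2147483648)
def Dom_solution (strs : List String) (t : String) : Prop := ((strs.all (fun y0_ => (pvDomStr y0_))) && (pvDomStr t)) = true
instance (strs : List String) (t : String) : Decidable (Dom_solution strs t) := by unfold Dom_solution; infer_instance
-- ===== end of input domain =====

-- B replaces A's backward dynamic-programming table over all prefix lengths by a level-synchronous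
-- breadth-first search over positions 0..len(t) (frontier list + visited set): it only visits
-- positions reachable by dictionary words and stops once the end is reached or the frontier empties.

-- `sub in strs` (Python list membership of the slice t[a:b])
def pvW (strs : List String) (t : String) (a b : Nat) : Bool :=
  strs.contains (PySem.Str.slice t (some (a : Int)) (some (b : Int)))

-- ===== PORT A =====
-- dp values: `some v` = an int, `none` = float('inf'); min over that order
def pvMinO : Option Nat → Option Nat → Option Nat
  | none, x => x
  | some x, none => some x
  | some x, some y => some (min x y)

def solution (strs : List String) (t : String) : Int :=
  let n := t.toList.length
  let dp := (List.range' 1 n).foldl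
    (fun dp i =>
      dp.set i
        ((([1, 2, 3, 4, 5] : List Nat).foldl
            (fun (st : Option Nat × Bool) j =>
              if st.2 then st
              else if i < j then (st.1, true)   -- `if i-j<0: break` (the flag models the break)
              else if pvW strs t (i - j) i = true then
                (pvMinO st.1 ((dp.getD (i - j) none).map (· + 1)), st.2)
              else st)
            (none, false)).1))
    (List.replicate (n + 1) (some 0))
  match dp.getD n none with
  | none => -1
  | some v => (v : Int)

-- ===== PORT B =====
-- inner `for j in range(1,6)` of Source B: try to discover position p+j from p
def pvBfsInner (strs : List String) (t : String) (n p : Nat)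
    (st : List Nat × PySem.Set Nat) : List Nat × PySem.Set Nat :=
  ([1, 2, 3, 4, 5] : List Nat).foldl
    (fun st j =>
      if p + j ≤ n ∧ PySem.Set.contains st.2 (p + j) = false ∧ pvW strs t p (p + j) = true then
        (st.1 ++ [p + j], PySem.Set.add st.2 (p + j))
      else st)
    st

-- the `while frontier:` loop of Source B; fuel n+2 is enough (proved below), fuel-out is unreachable
def pvBfsLoop (strs : List String) (t : String) (n : Nat) :
    Nat → List Nat → PySem.Set Nat → Nat → Int
  | 0, _, _, _ => -1
  | fuel + 1, frontier, visited, level =>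
    if frontier.isEmpty then -1
    else if frontier.contains n then (level : Int)
    else
      let r := frontier.foldl (fun st p => pvBfsInner strs t n p st) ([], visited)
      pvBfsLoop strs t n fuel r.1 r.2 (level + 1)

def solution_alt (strs : List String) (t : String) : Int :=
  let n := t.toList.length
  pvBfsLoop strs t n (n + 2) [0] (PySem.Set.ofList [0]) 0

-- ===== PRECONDITION & SPEC =====
def Spec_solution (strs : List String) (t : String) (out : Int) : Prop := out = solution_alt strs t
instance (strs : List String) (t : String) (out : Int) : Decidable (Spec_solution strs t out) := by unfold Spec_solution; infer_instance

-- ===== CLAIM (what is proved, stated in full; the proofs are below) =====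
def Claim_equal_solution : Prop := ∀ (strs : List String) (t : String), Dom_solution strs t → Spec_solution strs t (solution strs t)

-- ===== LEMMAS AND PROOFS =====

-- the common reference: the table of minimal word counts, built index by index
def pvG (W : Nat → Nat → Bool) (f : Nat → Option Nat) (i : Nat) (c : Option Nat) (j : Nat) :
    Option Nat :=
  if W (i - j) i = true then pvMinO c ((f (i - j)).map (· + 1)) else c

def pvL (W : Nat → Nat → Bool) : Nat → List (Option Nat)
  | 0 => [some 0]
  | m + 1 =>
    pvL W m ++
      [(([1, 2, 3, 4, 5] : List Nat).filter (fun j => j ≤ m + 1)).foldl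
          (pvG W (fun k => (pvL W m).getD k none) (m + 1)) none]

def pvD (W : Nat → Nat → Bool) (i : Nat) : Option Nat := (pvL W i).getD i none

def pvRes (W : Nat → Nat → Bool) (n : Nat) : Int :=
  match pvD W n with
  | none => -1
  | some v => (v : Int)

def pvLe (o : Option Nat) (l : Nat) : Prop := ∃ d, o = some d ∧ d ≤ l

def pvE (W : Nat → Nat → Bool) (n p q : Nat) : Prop :=
  ∃ j ∈ ([1, 2, 3, 4, 5] : List Nat), q = p + j ∧ q ≤ n ∧ W p q = true

theorem pvE_iff (W : Nat → Nat → Bool) (n p x : Nat) :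
    pvE W n p x ↔
      ∃ j ∈ ([1, 2, 3, 4, 5] : List Nat), x = p + j ∧ p + j ≤ n ∧ W p (p + j) = true := by
  constructor <;> rintro ⟨j, hj, rfl, h1, h2⟩ <;> exact ⟨j, hj, rfl, h1, h2⟩

theorem pvL_length (W : Nat → Nat → Bool) (m : Nat) : (pvL W m).length = m + 1 := by
  induction m with
  | zero => rfl
  | succ m ih => simp [pvL, ih]

theorem pvL_getD (W : Nat → Nat → Bool) :
    ∀ m k, k ≤ m → (pvL W m).getD k none = pvD W k := by
  intro m
  induction m with
  | zero =>
    intro k hk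
    have : k = 0 := by omega
    subst this; rfl
  | succ m ih =>
    intro k hk
    rcases Nat.lt_or_ge k (m + 1) with h | h
    · rw [pvL, List.getD_append _ _ _ k (by rw [pvL_length]; omega)]
      exact ih k (by omega)
    · have : k = m + 1 := by omega
      subst this; rfl

theorem pvGetD_concat (i : Nat) (xs : List (Option Nat)) (x : Option Nat)
    (hl : xs.length = i + 1) : (xs ++ [x]).getD (i + 1) none = x := by
  rw [List.getD_eq_getElem?_getD, ← hl, List.getElem?_concat_length]
  rfl

theorem pvD_succ_eq (W : Nat → Nat → Bool) (i : Nat) :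
    pvD W (i + 1) =
      (([1, 2, 3, 4, 5] : List Nat).filter (fun j => j ≤ i + 1)).foldl
        (pvG W (fun k => (pvL W i).getD k none) (i + 1)) none := by
  rw [pvD, pvL]
  exact pvGetD_concat i _ _ (pvL_length W i)

theorem break_fold_done (W : Nat → Nat → Bool) (dp : List (Option Nat)) (i : Nat) :
    ∀ (js : List Nat) (c : Option Nat),
      (js.foldl
          (fun (st : Option Nat × Bool) j =>
            if st.2 then st
            else if i < j then (st.1, true)
            else if W (i - j) i = true then
              (pvMinO st.1 ((dp.getD (i - j) none).map (· + 1)), st.2)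
            else st)
          (c, true)) = (c, true) := by
  intro js
  induction js with
  | nil => intro c; rfl
  | cons a tl ih => intro c; simpa using ih c

theorem break_fold (W : Nat → Nat → Bool) (dp : List (Option Nat)) (i : Nat) :
    ∀ (js : List Nat), js.Pairwise (· < ·) → ∀ (c : Option Nat),
      ((js.foldl
          (fun (st : Option Nat × Bool) j =>
            if st.2 then st
            else if i < j then (st.1, true)
            else if W (i - j) i = true then
              (pvMinO st.1 ((dp.getD (i - j) none).map (· + 1)), st.2)
            else st)
          (c, false)).1)
        = (js.filter (fun j => j ≤ i)).foldl (pvG W (fun k => dp.getD k none) i) c := by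
  intro js
  induction js with
  | nil => intro _ c; rfl
  | cons a tl ih =>
    intro hp c
    have ha : ∀ b ∈ tl, a < b := (List.pairwise_cons.mp hp).1
    have htl := (List.pairwise_cons.mp hp).2
    simp only [List.foldl_cons]
    by_cases h : i < a
    · rw [if_neg (by simp), if_pos h, break_fold_done]
      have hfa : (a :: tl).filter (fun j => j ≤ i) = [] := by
        rw [List.filter_eq_nil_iff]
        intro b hb
        rcases List.mem_cons.mp hb with rfl | hb
        · simp; omega
        · have := ha b hb; simp; omega
      rw [hfa]
      rfl
    · have hstep :
          (if (c, false).2 then (c, false)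
           else if i < a then ((c, false).1, true)
           else if W (i - a) i = true then
             (pvMinO (c, false).1 ((dp.getD (i - a) none).map (· + 1)), (c, false).2)
           else (c, false)) = (pvG W (fun k => dp.getD k none) i c a, false) := by
        simp only [if_neg (by simp : ¬ ((c, false).2 = true)), if_neg h, pvG]
        split_ifs <;> rfl
      rw [hstep, ih htl]
      have haa : a ≤ i := by omega
      have hfc : (a :: tl).filter (fun j => j ≤ i) = a :: tl.filter (fun j => j ≤ i) := by
        simp [haa]
      rw [hfc, List.foldl_cons]

theorem dp_fold (W : Nat → Nat → Bool) (n : Nat) :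
    ∀ m, m ≤ n →
      ((List.range' 1 m).foldl
        (fun dp i =>
          dp.set i
            ((([1, 2, 3, 4, 5] : List Nat).foldl
                (fun (st : Option Nat × Bool) j =>
                  if st.2 then st
                  else if i < j then (st.1, true)
                  else if W (i - j) i = true then
                    (pvMinO st.1 ((dp.getD (i - j) none).map (· + 1)), st.2)
                  else st)
                (none, false)).1))
        (List.replicate (n + 1) (some 0)))
        = pvL W m ++ List.replicate (n - m) (some 0) := by
  intro m
  induction m with
  | zero => intro _; simp [pvL, List.replicate_succ]
  | succ m ih =>
    intro hm
    rw [List.range'_1_concat, List.foldl_append, ih (by omega)]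
    rw [List.foldl_cons, List.foldl_nil]
    rw [Nat.add_comm 1 m]
    rw [break_fold W (pvL W m ++ List.replicate (n - m) (some 0))
        (m + 1) [1, 2, 3, 4, 5] (by decide) none]
    have hcong :
        (([1, 2, 3, 4, 5] : List Nat).filter (fun j => j ≤ m + 1)).foldl
            (pvG W (fun k => (pvL W m ++ List.replicate (n - m) (some 0)).getD k none) (m + 1))
            none
          = (([1, 2, 3, 4, 5] : List Nat).filter (fun j => j ≤ m + 1)).foldl
              (pvG W (fun k => (pvL W m).getD k none) (m + 1)) none := by
      apply PySem.List.foldl_congr_mem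
      intro c j hj
      rcases List.mem_filter.mp hj with ⟨hj5, hji⟩
      have hj5' : j = 1 ∨ j = 2 ∨ j = 3 ∨ j = 4 ∨ j = 5 := by simpa using hj5
      have hji' : j ≤ m + 1 := by simpa using hji
      simp only [pvG]
      rw [List.getD_append (pvL W m) (List.replicate (n - m) (some 0)) none (m + 1 - j)
        (by rw [pvL_length]; omega)]
    rw [hcong]
    rw [List.set_append, if_neg (by rw [pvL_length]; omega)]
    rw [pvL_length]
    have hrep : List.replicate (n - m) (some (0 : Nat)) =
        some 0 :: List.replicate (n - (m + 1)) (some 0) := by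
      rw [show n - m = (n - (m + 1)) + 1 by omega, List.replicate_succ]
    rw [hrep]
    simp [pvL]

theorem solution_eq (strs : List String) (t : String) :
    solution strs t = pvRes (pvW strs t) (t.toList.length) := by
  simp only [solution]
  rw [dp_fold (pvW strs t) t.toList.length t.toList.length le_rfl]
  cases h : (pvL (pvW strs t) t.toList.length).getD t.toList.length none with
  | none => simp [pvRes, pvD]
  | some v => simp [pvRes, pvD]

theorem pvLe_minO (a b : Option Nat) (l : Nat) :
    pvLe (pvMinO a b) l ↔ pvLe a l ∨ pvLe b l := by
  cases a <;> cases b <;> simp [pvMinO, pvLe]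

theorem pvLe_map (o : Option Nat) (l : Nat) : pvLe (o.map (· + 1)) (l + 1) ↔ pvLe o l := by
  cases o <;> simp [pvLe]

theorem pvLe_map0 (o : Option Nat) : ¬ pvLe (o.map (· + 1)) 0 := by
  cases o <;> simp [pvLe]

theorem pvLe_fold (W : Nat → Nat → Bool) (f : Nat → Option Nat) (i l : Nat) :
    ∀ (js : List Nat) (c : Option Nat),
      pvLe (js.foldl (pvG W f i) c) l ↔
        pvLe c l ∨ ∃ j ∈ js, W (i - j) i = true ∧ pvLe ((f (i - j)).map (· + 1)) l := by
  intro js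
  induction js with
  | nil => intro c; simp
  | cons a tl ih =>
    intro c
    rw [List.foldl_cons, ih]
    by_cases hW : W (i - a) i = true
    · rw [show pvG W f i c a = pvMinO c ((f (i - a)).map (· + 1)) from by simp [pvG, hW]]
      rw [pvLe_minO]
      simp only [List.mem_cons, exists_eq_or_imp, hW, true_and]
      tauto
    · rw [show pvG W f i c a = c from by simp [pvG, hW]]
      simp only [List.mem_cons, exists_eq_or_imp, hW]
      tauto

theorem pvD_zero (W : Nat → Nat → Bool) : pvD W 0 = some 0 := rfl

theorem pvD_succ (W : Nat → Nat → Bool) (i l : Nat) :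
    pvLe (pvD W (i + 1)) (l + 1) ↔
      ∃ j ∈ ([1, 2, 3, 4, 5] : List Nat),
        j ≤ i + 1 ∧ W (i + 1 - j) (i + 1) = true ∧ pvLe (pvD W (i + 1 - j)) l := by
  rw [pvD_succ_eq, pvLe_fold]
  constructor
  · rintro (h | ⟨j, hj, hWj, hle⟩)
    · exact absurd h (by simp [pvLe])
    · rcases List.mem_filter.mp hj with ⟨hj5, hji⟩
      have hj5' : j = 1 ∨ j = 2 ∨ j = 3 ∨ j = 4 ∨ j = 5 := by simpa using hj5
      have hji' : j ≤ i + 1 := by simpa using hji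
      refine ⟨j, hj5, hji', hWj, ?_⟩
      rw [← pvL_getD W i (i + 1 - j) (by omega)]
      exact (pvLe_map _ l).mp hle
  · rintro ⟨j, hj5, hji, hWj, hle⟩
    refine Or.inr ⟨j, List.mem_filter.mpr ⟨hj5, by simpa using hji⟩, hWj, ?_⟩
    have hj5' : j = 1 ∨ j = 2 ∨ j = 3 ∨ j = 4 ∨ j = 5 := by simpa using hj5
    refine (pvLe_map _ l).mpr ?_
    rwa [pvL_getD W i (i + 1 - j) (by omega)]

theorem pvD_succ_not0 (W : Nat → Nat → Bool) (i : Nat) : ¬ pvLe (pvD W (i + 1)) 0 := by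
  rw [pvD_succ_eq, pvLe_fold]
  rintro (h | ⟨j, _, _, h⟩)
  · exact absurd h (by simp [pvLe])
  · exact pvLe_map0 _ h

theorem pvD_le (W : Nat → Nat → Bool) :
    ∀ q d, pvD W q = some d → d ≤ q := by
  intro q
  induction q using Nat.strong_induction_on with
  | _ q ih =>
    intro d h
    cases q with
    | zero =>
      rw [pvD_zero] at h
      simp at h; omega
    | succ i =>
      cases d with
      | zero => exact absurd ⟨0, h, le_rfl⟩ (pvD_succ_not0 W i)
      | succ d' =>
        rcases (pvD_succ W i d').mp ⟨d' + 1, h, le_rfl⟩ with ⟨j, hj5, hji, hWj, e, he, hed⟩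
        have hj5' : j = 1 ∨ j = 2 ∨ j = 3 ∨ j = 4 ∨ j = 5 := by simpa using hj5
        have h1 : e ≤ i + 1 - j := ih (i + 1 - j) (by omega) e he
        rcases (pvD_succ W i e).mpr ⟨j, hj5, hji, hWj, e, he, le_rfl⟩ with ⟨d2, hd2, hle2⟩
        rw [h] at hd2
        have : d2 = d' + 1 := by simpa using hd2.symm
        omega

theorem pvD_pred (W : Nat → Nat → Bool) (q d : Nat) (h : pvD W q = some (d + 1)) :
    ∃ p, p < q ∧ pvD W p = some d := by
  cases q with
  | zero => rw [pvD_zero] at h; simp at h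
  | succ i =>
    rcases (pvD_succ W i d).mp ⟨d + 1, h, le_rfl⟩ with ⟨j, hj5, hji, hWj, e, he, hed⟩
    have hj5' : j = 1 ∨ j = 2 ∨ j = 3 ∨ j = 4 ∨ j = 5 := by simpa using hj5
    rcases (pvD_succ W i e).mpr ⟨j, hj5, hji, hWj, e, he, le_rfl⟩ with ⟨d2, hd2, hle2⟩
    rw [h] at hd2
    have hde : d2 = d + 1 := by simpa using hd2.symm
    have : e = d := by omega
    subst this
    exact ⟨i + 1 - j, by omega, he⟩

theorem pvD_chain (W : Nat → Nat → Bool) :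
    ∀ d q, pvD W q = some d → ∀ l, l ≤ d → ∃ p, p ≤ q ∧ pvD W p = some l := by
  intro d
  induction d with
  | zero =>
    intro q h l hl
    have : l = 0 := by omega
    subst this
    exact ⟨q, le_rfl, h⟩
  | succ d ih =>
    intro q h l hl
    by_cases hld : l = d + 1
    · subst hld; exact ⟨q, le_rfl, h⟩
    · rcases pvD_pred W q d h with ⟨p, hpq, hp⟩
      rcases ih p hp l (by omega) with ⟨p', hp', h'⟩
      exact ⟨p', by omega, h'⟩

theorem pvLe_succ_iff (o : Option Nat) (l : Nat) :
    pvLe o (l + 1) ↔ pvLe o l ∨ o = some (l + 1) := by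
  cases o <;> simp [pvLe] <;> omega

theorem pvLevel_step (W : Nat → Nat → Bool) (n l x : Nat) :
    (x ≤ n ∧ pvD W x = some (l + 1)) ↔
      (¬ (x ≤ n ∧ pvLe (pvD W x) l) ∧
        ∃ p, (p ≤ n ∧ pvD W p = some l) ∧ pvE W n p x) := by
  constructor
  · rintro ⟨hxn, hx⟩
    constructor
    · rintro ⟨-, e, he, hel⟩
      rw [hx] at he
      have : l + 1 = e := by simpa using he
      omega
    · cases x with
      | zero => rw [pvD_zero] at hx; simp at hx
      | succ i =>
        rcases (pvD_succ W i l).mp ⟨l + 1, hx, le_rfl⟩ with ⟨j, hj5, hji, hWj, e, he, hel⟩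
        have hj5' : j = 1 ∨ j = 2 ∨ j = 3 ∨ j = 4 ∨ j = 5 := by simpa using hj5
        rcases (pvD_succ W i e).mpr ⟨j, hj5, hji, hWj, e, he, le_rfl⟩ with ⟨d2, hd2, hle2⟩
        rw [hx] at hd2
        have hde : d2 = l + 1 := by simpa using hd2.symm
        have hel' : e = l := by omega
        subst hel'
        exact ⟨i + 1 - j, ⟨by omega, he⟩, ⟨j, hj5, by omega, hxn, hWj⟩⟩
  · rintro ⟨hnv, p, ⟨hpn, hpl⟩, j, hj5, hxpj, hxn, hWpx⟩
    have hj5' : j = 1 ∨ j = 2 ∨ j = 3 ∨ j = 4 ∨ j = 5 := by simpa using hj5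
    refine ⟨hxn, ?_⟩
    obtain ⟨i, rfl⟩ : ∃ i, x = i + 1 := ⟨x - 1, by omega⟩
    have hip : i + 1 - j = p := by omega
    have hfor : pvLe (pvD W (i + 1)) (l + 1) := by
      refine (pvD_succ W i l).mpr ⟨j, hj5, by omega, ?_, ?_⟩
      · rw [hip]; exact hWpx
      · rw [hip]; exact ⟨l, hpl, le_rfl⟩
    rcases hfor with ⟨e, he, hel⟩
    have hne : ¬ pvLe (pvD W (i + 1)) l := fun hp' => hnv ⟨hxn, hp'⟩
    have : e = l + 1 := by
      by_contra hc
      exact hne ⟨e, he, by omega⟩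
    subst this
    exact he

theorem inner_spec (strs : List String) (t : String) (n p : Nat) :
    ∀ (js : List Nat) (st0 : List Nat × PySem.Set Nat),
      (∀ x, x ∈ (js.foldl
          (fun (st : List Nat × PySem.Set Nat) j =>
            if p + j ≤ n ∧ PySem.Set.contains st.2 (p + j) = false ∧
                pvW strs t p (p + j) = true then
              (st.1 ++ [p + j], PySem.Set.add st.2 (p + j))
            else st) st0).2 ↔
        x ∈ st0.2 ∨ ∃ j ∈ js, x = p + j ∧ p + j ≤ n ∧ pvW strs t p (p + j) = true) ∧
      (∀ x, x ∈ (js.foldl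
          (fun (st : List Nat × PySem.Set Nat) j =>
            if p + j ≤ n ∧ PySem.Set.contains st.2 (p + j) = false ∧
                pvW strs t p (p + j) = true then
              (st.1 ++ [p + j], PySem.Set.add st.2 (p + j))
            else st) st0).1 ↔
        x ∈ st0.1 ∨ (x ∉ st0.2 ∧ ∃ j ∈ js, x = p + j ∧ p + j ≤ n ∧ pvW strs t p (p + j) = true)) := by
  intro js
  induction js with
  | nil =>
    intro st0
    constructor <;> intro x <;> simp
  | cons a tl ih =>
    intro st0
    simp only [List.foldl_cons]
    by_cases hC : p + a ≤ n ∧ PySem.Set.contains st0.2 (p + a) = false ∧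
        pvW strs t p (p + a) = true
    · rw [if_pos hC]
      obtain ⟨h1, h2, h3⟩ := hC
      have hnv : p + a ∉ st0.2 := by
        intro hm
        rw [(PySem.Set.contains_iff _ _).mpr hm] at h2
        simp at h2
      obtain ⟨ihv, ihn⟩ := ih (st0.1 ++ [p + a], PySem.Set.add st0.2 (p + a))
      constructor
      · intro x
        rw [ihv x]
        simp only [PySem.Set.mem_add, List.mem_cons, exists_eq_or_imp]
        constructor
        · rintro ((hx | rfl) | htl)
          · exact Or.inl hx
          · exact Or.inr (Or.inl ⟨rfl, h1, h3⟩)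
          · exact Or.inr (Or.inr htl)
        · rintro (hx | (⟨rfl, -, -⟩ | htl))
          · exact Or.inl (Or.inl hx)
          · exact Or.inl (Or.inr rfl)
          · exact Or.inr htl
      · intro x
        rw [ihn x]
        simp only [List.mem_append, PySem.Set.mem_add, List.mem_cons, List.not_mem_nil,
          or_false, exists_eq_or_imp]
        constructor
        · rintro ((hx | rfl) | ⟨hnm, htl⟩)
          · exact Or.inl hx
          · exact Or.inr ⟨hnv, Or.inl ⟨rfl, h1, h3⟩⟩
          · exact Or.inr ⟨fun hm => hnm (Or.inl hm), Or.inr htl⟩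
        · rintro (hx | ⟨hnm, (⟨rfl, -, -⟩ | htl)⟩)
          · exact Or.inl (Or.inl hx)
          · exact Or.inl (Or.inr rfl)
          · by_cases hxa : x = p + a
            · exact Or.inl (Or.inr hxa)
            · refine Or.inr ⟨?_, htl⟩
              rintro (hm | hm)
              · exact hnm hm
              · exact hxa hm
    · rw [if_neg hC]
      obtain ⟨ihv, ihn⟩ := ih st0
      have habs : p + a ≤ n → pvW strs t p (p + a) = true → p + a ∈ st0.2 := by
        intro h1 h3
        cases hcb : PySem.Set.contains st0.2 (p + a) with
        | true => exact (PySem.Set.contains_iff _ _).mp hcb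
        | false => exact absurd ⟨h1, hcb, h3⟩ hC
      constructor
      · intro x
        rw [ihv x]
        simp only [List.mem_cons, exists_eq_or_imp]
        constructor
        · rintro (hx | htl)
          exacts [Or.inl hx, Or.inr (Or.inr htl)]
        · rintro (hx | (⟨rfl, h1, h3⟩ | htl))
          exacts [Or.inl hx, Or.inl (habs h1 h3), Or.inr htl]
      · intro x
        rw [ihn x]
        simp only [List.mem_cons, exists_eq_or_imp]
        constructor
        · rintro (hx | ⟨hnm, htl⟩)
          exacts [Or.inl hx, Or.inr ⟨hnm, Or.inr htl⟩]
        · rintro (hx | ⟨hnm, (⟨rfl, h1, h3⟩ | htl)⟩)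
          · exact Or.inl hx
          · exact absurd (habs h1 h3) hnm
          · exact Or.inr ⟨hnm, htl⟩

theorem pvBfsInner_spec (strs : List String) (t : String) (n p : Nat)
    (st0 : List Nat × PySem.Set Nat) :
    (∀ x, x ∈ (pvBfsInner strs t n p st0).2 ↔ x ∈ st0.2 ∨ pvE (pvW strs t) n p x) ∧
    (∀ x, x ∈ (pvBfsInner strs t n p st0).1 ↔
      x ∈ st0.1 ∨ (x ∉ st0.2 ∧ pvE (pvW strs t) n p x)) := by
  obtain ⟨hv, hn⟩ := inner_spec strs t n p [1, 2, 3, 4, 5] st0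
  unfold pvBfsInner
  constructor <;> intro x
  · rw [hv x, pvE_iff]
  · rw [hn x, pvE_iff]

theorem outer_spec (strs : List String) (t : String) (n : Nat) :
    ∀ (fr : List Nat) (st0 : List Nat × PySem.Set Nat),
      (∀ x, x ∈ (fr.foldl (fun st p => pvBfsInner strs t n p st) st0).2 ↔
        x ∈ st0.2 ∨ ∃ p ∈ fr, pvE (pvW strs t) n p x) ∧
      (∀ x, x ∈ (fr.foldl (fun st p => pvBfsInner strs t n p st) st0).1 ↔
        x ∈ st0.1 ∨ (x ∉ st0.2 ∧ ∃ p ∈ fr, pvE (pvW strs t) n p x)) := by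
  intro fr
  induction fr with
  | nil =>
    intro st0
    constructor <;> intro x <;> simp
  | cons p0 tl ih =>
    intro st0
    simp only [List.foldl_cons]
    obtain ⟨h2, h1⟩ := pvBfsInner_spec strs t n p0 st0
    obtain ⟨ihv, ihn⟩ := ih (pvBfsInner strs t n p0 st0)
    constructor
    · intro x
      rw [ihv x, h2 x]
      simp only [List.mem_cons, exists_eq_or_imp]
      tauto
    · intro x
      rw [ihn x, h1 x, h2 x]
      simp only [List.mem_cons, exists_eq_or_imp]
      tauto

theorem bfs_run (strs : List String) (t : String) (n : Nat) :
    ∀ (fuel l : Nat) (frontier : List Nat) (visited : PySem.Set Nat),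
      (∀ q, q ∈ frontier ↔ (q ≤ n ∧ pvD (pvW strs t) q = some l)) →
      (∀ q, q ∈ visited ↔ (q ≤ n ∧ pvLe (pvD (pvW strs t) q) l)) →
      (∀ k, k < l → pvD (pvW strs t) n ≠ some k) →
      n + 2 ≤ fuel + l →
      pvBfsLoop strs t n fuel frontier visited l = pvRes (pvW strs t) n := by
  intro fuel
  induction fuel with
  | zero =>
    intro l frontier visited hf hv hlow hfuel
    cases h : pvD (pvW strs t) n with
    | none => simp [pvBfsLoop, pvRes, h]
    | some d =>
      exact absurd h (hlow d (by have := pvD_le (pvW strs t) n d h; omega))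
  | succ fuel ih =>
    intro l frontier visited hf hv hlow hfuel
    simp only [pvBfsLoop]
    by_cases hemp : frontier.isEmpty
    · rw [if_pos hemp]
      have hfe : frontier = [] := List.isEmpty_iff.mp hemp
      cases h : pvD (pvW strs t) n with
      | none => simp [pvRes, h]
      | some d =>
        exfalso
        have hld : l ≤ d := by
          by_contra hc
          exact hlow d (by omega) h
        rcases pvD_chain (pvW strs t) d n h l hld with ⟨p, hpn, hp⟩
        have : p ∈ frontier := (hf p).mpr ⟨hpn, hp⟩
        rw [hfe] at this
        simp at this
    · rw [if_neg hemp]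
      by_cases hcont : frontier.contains n
      · rw [if_pos hcont]
        have hn : pvD (pvW strs t) n = some l := ((hf n).mp (List.contains_iff_mem.mp hcont)).2
        simp [pvRes, hn]
      · rw [if_neg hcont]
        have hnl : pvD (pvW strs t) n ≠ some l := fun h =>
          hcont (List.contains_iff_mem.mpr ((hf n).mpr ⟨le_rfl, h⟩))
        obtain ⟨hv2, hn2⟩ := outer_spec strs t n frontier ([], visited)
        apply ih (l + 1)
        · intro q
          rw [hn2 q]
          have hstep := pvLevel_step (pvW strs t) n l q
          simp only [List.not_mem_nil, false_or]
          constructor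
          · rintro ⟨hqv, p, hpf, hpe⟩
            exact hstep.mpr ⟨fun hc => hqv ((hv q).mpr hc), p, (hf p).mp hpf, hpe⟩
          · intro hq
            rcases hstep.mp hq with ⟨hnv, p, hps, hpe⟩
            exact ⟨fun hm => hnv ((hv q).mp hm), p, (hf p).mpr hps, hpe⟩
        · intro q
          rw [hv2 q]
          have hstep := pvLevel_step (pvW strs t) n l q
          constructor
          · rintro (hm | ⟨p, hpf, hpe⟩)
            · rcases (hv q).mp hm with ⟨hqn, hle⟩
              exact ⟨hqn, (pvLe_succ_iff _ _).mpr (Or.inl hle)⟩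
            · have hqn : q ≤ n := by
                rcases hpe with ⟨j, -, rfl, hqn, -⟩
                exact hqn
              by_cases hql : pvLe (pvD (pvW strs t) q) l
              · exact ⟨hqn, (pvLe_succ_iff _ _).mpr (Or.inl hql)⟩
              · have := hstep.mpr ⟨fun hc => hql hc.2, p, (hf p).mp hpf, hpe⟩
                exact ⟨hqn, (pvLe_succ_iff _ _).mpr (Or.inr this.2)⟩
          · rintro ⟨hqn, hle⟩
            rcases (pvLe_succ_iff _ _).mp hle with h | h
            · exact Or.inl ((hv q).mpr ⟨hqn, h⟩)
            · rcases hstep.mp ⟨hqn, h⟩ with ⟨-, p, hps, hpe⟩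
              exact Or.inr ⟨p, (hf p).mpr hps, hpe⟩
        · intro k hk
          rcases Nat.lt_or_ge k l with h | h
          · exact hlow k h
          · have : k = l := by omega
            subst this
            exact hnl
        · omega

theorem solution_alt_eq (strs : List String) (t : String) :
    solution_alt strs t = pvRes (pvW strs t) (t.toList.length) := by
  simp only [solution_alt]
  apply bfs_run
  · intro q
    constructor
    · intro hq
      have : q = 0 := by simpa using hq
      subst this
      exact ⟨Nat.zero_le _, pvD_zero _⟩
    · rintro ⟨hq, h0⟩
      cases q with
      | zero => simp
      | succ i => exact absurd ⟨0, h0, le_rfl⟩ (pvD_succ_not0 _ i)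
  · intro q
    show q ∈ PySem.Set.ofList [0] ↔ _
    have : PySem.Set.ofList [0] = ([0] : List Nat) := rfl
    rw [this]
    constructor
    · intro hq
      have : q = 0 := by simpa using hq
      subst this
      exact ⟨Nat.zero_le _, 0, pvD_zero _, le_rfl⟩
    · rintro ⟨hq, h0⟩
      cases q with
      | zero => simp
      | succ i => exact absurd h0 (pvD_succ_not0 _ i)
  · intro k hk
    omega
  · omega

-- ===== VERDICT (by name: the statement is the Claim_ definition above) =====
theorem solution_spec : Claim_equal_solution := by
  intro strs t _
  unfold Spec_solution
  rw [solution_eq, solution_alt_eq]
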